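-- pv_equiv track=rewrite | github.com/mohammadfaiizan/ProjectI | DSA/Problem/Trie/04_Suffix_Trees_Advanced_Structures/1178_Number_of_Valid_Words_for_Each_Puzzle.py | findNumOfValidWords1
-- ===== SOURCE A (Python) =====
-- from typing import List, Dict, Set
--
-- def findNumOfValidWords1(words: List[str], puzzles: List[str]) -> List[int]:
--     """
--     Approach 1: Brute Force with Set Operations
--
--     For each puzzle, check each word to see if it's valid.
--
--     Time: O(W * P * max_word_length) where W=words, P=puzzles
--     Space: O(max_word_length)
--     """
--     result = []
--
--     for puzzle in puzzles:
--         puzzle_set = set(puzzle)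
--         first_char = puzzle[0]
--         count = 0
--
--         for word in words:
--             word_set = set(word)
--
--             # Check if word contains first letter of puzzle
--             if first_char in word_set:
--                 # Check if all letters in word are in puzzle
--                 if word_set.issubset(puzzle_set):
--                     count += 1
--
--         result.append(count)
--
--     return result
-- ===== SOURCE B (Python) =====
-- def findNumOfValidWords1(words, puzzles):
--     # Bitmask every word's character set once, counted in a dict; each puzzle
--     # is answered by scanning the distinct masks with O(1) bit tests.
--     counts = {}
--     for w in words:
--         m = 0
--         for ch in w:
--             m |= 1 << ord(ch)
--         counts[m] = counts.get(m, 0) + 1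
--     result = []
--     for p in puzzles:
--         pm = 0
--         for ch in p:
--             pm |= 1 << ord(ch)
--         fb = 1 << ord(p[0])
--         total = 0
--         for m, c in counts.items():
--             if m & fb != 0 and m & pm == m:
--                 total += c
--         result.append(total)
--     return result
-- ===== Notes on version B (the rewrite author's own statement) =====
-- stated objective: faster
-- what changed: Instead of rebuilding Python sets for every (puzzle, word) pair and testing set membership/subset, B bitmasks each word's character set once into a dict of counts and answers each puzzle by scanning only the distinct masks with two constant-time bit operations.
import Mathlib
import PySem

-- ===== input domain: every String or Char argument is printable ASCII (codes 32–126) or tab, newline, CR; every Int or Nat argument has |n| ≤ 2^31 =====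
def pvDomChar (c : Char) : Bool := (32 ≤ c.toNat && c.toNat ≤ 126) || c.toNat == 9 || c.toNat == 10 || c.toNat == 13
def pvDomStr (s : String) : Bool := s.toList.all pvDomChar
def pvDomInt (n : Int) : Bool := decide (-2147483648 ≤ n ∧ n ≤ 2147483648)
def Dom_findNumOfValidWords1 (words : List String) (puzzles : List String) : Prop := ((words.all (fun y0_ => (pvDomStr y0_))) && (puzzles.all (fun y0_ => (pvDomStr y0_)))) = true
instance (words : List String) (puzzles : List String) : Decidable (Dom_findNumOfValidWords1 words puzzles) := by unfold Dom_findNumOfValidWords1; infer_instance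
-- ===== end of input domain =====

-- B replaces A's per-(puzzle,word) set construction and subset tests by one pass
-- bitmasking each word's character set into a dict of counts, then answers each
-- puzzle scanning only the distinct masks with constant-time bit operations.

-- ===== PORT A =====
-- A: for each puzzle build set(puzzle), take puzzle[0], then scan all words,
-- building set(word) and testing membership + issubset.
def findNumOfValidWords1 (words : List String) (puzzles : List String) : List Int :=
  puzzles.foldl (fun result puzzle =>
    let puzzle_set : PySem.Set Char := PySem.Set.ofList puzzle.toList
    -- puzzle[0]: IndexError on empty puzzle (excluded by Pre_); default never used inside Pre_
    let first_char : Char := (PySem.Str.pyGet? puzzle 0).getD ' '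
    let count : Int := words.foldl (fun count word =>
      let word_set : PySem.Set Char := PySem.Set.ofList word.toList
      if PySem.Set.contains word_set first_char then
        if PySem.Set.issubset word_set puzzle_set then count + 1 else count
      else count) 0
    result ++ [count]) []

-- ===== PORT B =====
-- character-set bitmask of a string: m |= 1 << ord(ch) for each ch (ord(ch) ≥ 0, so Nat is exact)
def pvMask (s : String) : Nat :=
  s.toList.foldl (fun m c => m ||| (1 <<< c.toNat)) 0

def findNumOfValidWords1_alt (words : List String) (puzzles : List String) : List Int :=
  let counts : PySem.Dict Nat Int :=
    words.foldl (fun d w => d.insert (pvMask w) (d.getD (pvMask w) 0 + 1)) PySem.Dict.empty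
  puzzles.foldl (fun result p =>
    let pm : Nat := pvMask p
    -- p[0]: IndexError on empty puzzle (excluded by Pre_); default never used inside Pre_
    let fb : Nat := 1 <<< ((PySem.Str.pyGet? p 0).getD ' ').toNat
    let total : Int := counts.items.foldl (fun t mc =>
      if mc.1 &&& fb != 0 && (mc.1 &&& pm == mc.1) then t + mc.2 else t) 0
    result ++ [total]) []

-- ===== PRECONDITION & SPEC =====
-- Pre_ excludes only the inputs on which A raises: an empty puzzle string makes puzzle[0] an IndexError.
def Pre_findNumOfValidWords1 (words : List String) (puzzles : List String) : Prop :=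
  ∀ p ∈ puzzles, p ≠ ""
instance (words : List String) (puzzles : List String) : Decidable (Pre_findNumOfValidWords1 words puzzles) := by unfold Pre_findNumOfValidWords1; infer_instance
def pvWitness_findNumOfValidWords1 : List String × List String :=
  (["apple", "pleas", "please"], ["aelwxyz", "aelpxyz"])
def Spec_findNumOfValidWords1 (words : List String) (puzzles : List String) (out : List Int) : Prop := out = findNumOfValidWords1_alt words puzzles
instance (words : List String) (puzzles : List String) (out : List Int) : Decidable (Spec_findNumOfValidWords1 words puzzles out) := by unfold Spec_findNumOfValidWords1; infer_instance

-- ===== CLAIM (what is proved, stated in full; the proofs are below) =====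
def Claim_equal_findNumOfValidWords1 : Prop := ∀ (words : List String) (puzzles : List String), Dom_findNumOfValidWords1 words puzzles → Pre_findNumOfValidWords1 words puzzles → Spec_findNumOfValidWords1 words puzzles (findNumOfValidWords1 words puzzles)

-- ===== LEMMAS AND PROOFS =====

-- bits of pvMask are exactly the character codes of the string
theorem pvMask_testBit_foldl (l : List Char) (m n : Nat) :
    (l.foldl (fun m c => m ||| (1 <<< c.toNat)) m).testBit n
      = (m.testBit n || l.any (fun c => c.toNat == n)) := by
  induction l generalizing m with
  | nil => simp
  | cons c t ih =>
    simp only [List.foldl_cons, ih, List.any_cons]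
    rw [Nat.testBit_or]
    have h1 : (1 <<< c.toNat).testBit n = (c.toNat == n) := by
      rw [Nat.one_shiftLeft]
      rcases eq_or_ne c.toNat n with h | h
      · simp [h, Nat.testBit_two_pow_self]
      · simp [Nat.testBit_two_pow_of_ne h, h]
    rw [h1]
    cases m.testBit n <;> cases (c.toNat == n) <;> simp

theorem pvMask_testBit (s : String) (n : Nat) :
    (pvMask s).testBit n = s.toList.any (fun c => c.toNat == n) := by
  unfold pvMask; rw [pvMask_testBit_foldl]; simp

theorem testBit_mem (l : List Char) (c : Char) :
    (l.any (fun a => a.toNat == c.toNat)) = true ↔ c ∈ l := by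
  simp only [List.any_eq_true, beq_iff_eq]
  constructor
  · rintro ⟨a, ha, h⟩; exact Char.ext (UInt32.toNat_inj.mp h) ▸ ha
  · exact fun h => ⟨c, h, rfl⟩

-- m & (1 << k) != 0 tests bit k
theorem and_shift_ne_zero (m k : Nat) : (m &&& (1 <<< k) != 0) = m.testBit k := by
  rw [Nat.one_shiftLeft, Nat.and_two_pow]
  cases h : m.testBit k
  · simp
  · simp [Nat.pow_eq_zero]

-- m & pm == m is bit-wise subset
theorem and_eq_self_iff (m p : Nat) :
    (m &&& p == m) = true ↔ ∀ n, m.testBit n = true → p.testBit n = true := by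
  rw [beq_iff_eq]
  constructor
  · intro h n hm
    have := congrArg (fun x => x.testBit n) h
    simp only [Nat.testBit_and, hm] at this
    simpa using this
  · intro h
    apply Nat.eq_of_testBit_eq
    intro n
    rw [Nat.testBit_and]
    cases hm : m.testBit n
    · simp
    · simp [h n hm]

-- A's inner word loop counts a predicate
theorem a_inner_count (words : List String) (fc : Char) (ps : PySem.Set Char) (a : Int) :
    words.foldl (fun count word =>
      if PySem.Set.contains (PySem.Set.ofList word.toList) fc then
        if PySem.Set.issubset (PySem.Set.ofList word.toList) ps then count + 1 else count
      else count) a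
    = a + (words.countP (fun w =>
        PySem.Set.contains (PySem.Set.ofList w.toList) fc
          && PySem.Set.issubset (PySem.Set.ofList w.toList) ps) : Int) := by
  induction words generalizing a with
  | nil => simp
  | cons w t ih =>
    rw [List.foldl_cons, List.countP_cons]
    by_cases h1 : PySem.Set.contains (PySem.Set.ofList w.toList) fc = true <;>
      by_cases h2 : PySem.Set.issubset (PySem.Set.ofList w.toList) ps = true <;>
        simp only [h1, h2, ih, Bool.and_true, Bool.and_false,
          if_true, if_false, Bool.false_eq_true] <;>
        push_cast <;> omega

-- B's items loop is a sum of guarded counts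
theorem b_items_sum (l : List (Nat × Int)) (g : Nat → Bool) (a : Int) :
    l.foldl (fun t mc => if g mc.1 then t + mc.2 else t) a
      = a + (l.map (fun mc => if g mc.1 then mc.2 else 0)).sum := by
  induction l generalizing a with
  | nil => simp
  | cons mc t ih =>
    rw [List.foldl_cons, List.map_cons, List.sum_cons]
    by_cases h : g mc.1 = true <;>
      simp only [h, ih, if_true, if_false, Bool.false_eq_true] <;> omega

-- pointwise sum splitting over Int
theorem pv_sum_map_add {α : Type} (l : List α) (f g : α → Int) :
    (l.map (fun x => f x + g x)).sum = (l.map f).sum + (l.map g).sum := by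
  induction l with
  | nil => simp
  | cons a t ih => simp only [List.map_cons, List.sum_cons, ih]; ring

-- single-hit sum over a nodup list
theorem sum_single_hit (d : List Nat) (hd : d.Nodup) (g : Nat → Bool) (x : Nat) (hx : x ∈ d) :
    (d.map (fun k => if g k && (k == x) then (1 : Int) else 0)).sum
      = if g x then 1 else 0 := by
  induction d with
  | nil => cases hx
  | cons y t ih =>
    rcases List.nodup_cons.mp hd with ⟨hy, ht⟩
    rw [List.map_cons, List.sum_cons]
    rcases List.mem_cons.mp hx with h | h
    · have hz : ∀ k ∈ t, (if g k && (k == x) then (1 : Int) else 0) = 0 := by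
        intro k hk
        have hne : k ≠ x := fun e => hy (h ▸ e ▸ hk)
        simp [hne]
      rw [List.map_congr_left hz, ← h]
      simp
    · have hne : y ≠ x := fun e => hy (e ▸ h)
      rw [ih ht h]
      simp [hne]

-- sum over the distinct values of their guarded multiplicities = countP
theorem sum_dedup_count (xs : List Nat) (g : Nat → Bool) (d : List Nat)
    (hd : d.Nodup) (hsub : ∀ x ∈ xs, x ∈ d) :
    (d.map (fun k => if g k then (xs.count k : Int) else 0)).sum = (xs.countP g : Int) := by
  induction xs with
  | nil => simp
  | cons x t ih =>
    have hsubt : ∀ y ∈ t, y ∈ d := fun y hy => hsub y (List.mem_cons_of_mem _ hy)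
    have hx : x ∈ d := hsub x (List.mem_cons_self ..)
    have split : ∀ k ∈ d, (if g k then (((x :: t).count k : Nat) : Int) else 0)
        = (if g k then (t.count k : Int) else 0) + (if g k && (k == x) then (1 : Int) else 0) := by
      intro k _
      rw [List.count_cons]
      by_cases he : k = x
      · subst he
        by_cases hg : g k = true
        · simp [hg]
        · simp [hg]
      · by_cases hg : g k = true
        · simp [hg, he]; exact fun e => he e.symm
        · simp [hg]
    rw [List.map_congr_left split, pv_sum_map_add, ih hsubt,
      sum_single_hit d hd g x hx, List.countP_cons]
    by_cases hg : g x = true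
    · simp [hg]
    · simp [hg]

-- the two per-word predicates agree
theorem pred_agree (p : String) (fc : Char) (w : String) :
    ((pvMask w &&& (1 <<< fc.toNat) != 0) && (pvMask w &&& pvMask p == pvMask w)) = true
      ↔ (PySem.Set.contains (PySem.Set.ofList w.toList) fc
          && PySem.Set.issubset (PySem.Set.ofList w.toList) (PySem.Set.ofList p.toList)) = true := by
  rw [Bool.and_eq_true, Bool.and_eq_true, and_shift_ne_zero, and_eq_self_iff]
  constructor
  · rintro ⟨h1, h2⟩
    constructor
    · rw [PySem.Set.contains_iff, PySem.Set.mem_ofList]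
      rw [pvMask_testBit] at h1
      exact (testBit_mem _ _).mp h1
    · rw [PySem.Set.issubset_iff]
      intro c hc
      rw [PySem.Set.mem_ofList] at hc ⊢
      have hw : (pvMask w).testBit c.toNat = true := by
        rw [pvMask_testBit]; exact (testBit_mem _ _).mpr hc
      have := h2 _ hw
      rw [pvMask_testBit] at this
      exact (testBit_mem _ _).mp this
  · rintro ⟨h1, h2⟩
    constructor
    · rw [pvMask_testBit]
      rw [PySem.Set.contains_iff, PySem.Set.mem_ofList] at h1
      exact (testBit_mem _ _).mpr h1
    · intro n hn
      rw [pvMask_testBit] at hn ⊢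
      rw [List.any_eq_true] at hn
      obtain ⟨c, hc, hcn⟩ := hn
      rw [PySem.Set.issubset_iff] at h2
      have hcp : c ∈ p.toList := by
        have := h2 c (by rw [PySem.Set.mem_ofList]; exact hc)
        rwa [PySem.Set.mem_ofList] at this
      rw [List.any_eq_true]
      exact ⟨c, hcp, hcn⟩

-- per-puzzle equality of A's count and B's total
theorem per_puzzle (words : List String) (p : String) (fc : Char) :
    (words.foldl (fun count word =>
      if PySem.Set.contains (PySem.Set.ofList word.toList) fc then
        if PySem.Set.issubset (PySem.Set.ofList word.toList) (PySem.Set.ofList p.toList)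
        then count + 1 else count
      else count) (0 : Int))
    = ((words.foldl (fun d w => d.insert (pvMask w) (d.getD (pvMask w) 0 + 1))
          (PySem.Dict.empty : PySem.Dict Nat Int)).items.foldl (fun t mc =>
        if mc.1 &&& (1 <<< fc.toNat) != 0 && (mc.1 &&& pvMask p == mc.1)
        then t + mc.2 else t) (0 : Int)) := by
  have hc : words.foldl (fun d w => d.insert (pvMask w) (d.getD (pvMask w) 0 + 1))
      (PySem.Dict.empty : PySem.Dict Nat Int)
      = PySem.Dict.counter (words.map pvMask) := by
    rw [← PySem.Dict.foldl_insert_getD_add_one_eq_counter, List.foldl_map]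
  rw [hc, a_inner_count,
    b_items_sum _ (fun k => k &&& (1 <<< fc.toNat) != 0 && (k &&& pvMask p == k)),
    PySem.Dict.items_counter, List.map_map]
  have hmem : ∀ x ∈ words.map pvMask, x ∈ PySem.Set.ofList (words.map pvMask) := by
    intro x hxx; rw [PySem.Set.mem_ofList]; exact hxx
  rw [show ((fun (mc : Nat × Int) =>
        if mc.1 &&& (1 <<< fc.toNat) != 0 && (mc.1 &&& pvMask p == mc.1) then mc.2 else 0) ∘
        (fun k => (k, ((words.map pvMask).count k : Int))))
      = (fun k => if (k &&& (1 <<< fc.toNat) != 0 && (k &&& pvMask p == k))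
          then (((words.map pvMask).count k : Nat) : Int) else 0) from rfl]
  rw [sum_dedup_count _ _ _ (PySem.Set.nodup_ofList _) hmem, List.countP_map]
  congr 1
  norm_cast
  apply List.countP_congr
  intro w _
  have h := pred_agree p fc w
  simp only [Function.comp]
  constructor
  · exact h.mpr
  · exact h.mp

-- outer loops: both builds append one entry per puzzle; entries agree by per_puzzle
theorem outer_fold (words : List String) (ps : List String) (acc : List Int) :
    ps.foldl (fun result puzzle =>
      result ++ [words.foldl (fun count word =>
        if PySem.Set.contains (PySem.Set.ofList word.toList)
            ((PySem.Str.pyGet? puzzle 0).getD ' ') then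
          if PySem.Set.issubset (PySem.Set.ofList word.toList)
              (PySem.Set.ofList puzzle.toList) then count + 1 else count
        else count) (0 : Int)]) acc
  = ps.foldl (fun result p =>
      result ++ [(words.foldl (fun d w => d.insert (pvMask w) (d.getD (pvMask w) 0 + 1))
          (PySem.Dict.empty : PySem.Dict Nat Int)).items.foldl
        (fun t mc => if mc.1 &&& (1 <<< ((PySem.Str.pyGet? p 0).getD ' ').toNat) != 0
            && (mc.1 &&& pvMask p == mc.1) then t + mc.2 else t) (0 : Int)]) acc := by
  induction ps generalizing acc with
  | nil => rfl
  | cons p t ih =>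
    rw [List.foldl_cons, List.foldl_cons,
      per_puzzle words p ((PySem.Str.pyGet? p 0).getD ' '), ih]

-- ===== VERDICT (by name: the statement is the Claim_ definition above) =====
theorem findNumOfValidWords1_spec : Claim_equal_findNumOfValidWords1 := by
  intro words puzzles _ _
  unfold Spec_findNumOfValidWords1 findNumOfValidWords1 findNumOfValidWords1_alt
  exact outer_fold words puzzles []
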